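-- pv_equiv track=rewrite | github.com/YonHoshihara/cryptlib | Encrypt/RSA.py | get_public_keys
-- ===== SOURCE A (Python) =====
-- def totient(p1,p2):
--
--     '''
--     totient function ofr use in RSA criptografy
--     :param p1: first prime number
--     :param p2: secont prime number
--     :return: return the number of primes lower then p1*p2
--     '''
--     return (p1-1)*(p2-1)
--
-- def euclidian_mdc(divider,dividend):
--     '''
--
--     :param divider: the divider
--     :param dividend: the dividend
--     :return: return the mdc between numbers
--     '''
--     while divider != 0:
--         temp = divider
--         divider = dividend % divider
--         dividend = temp
--     return dividend
--
-- def get_public_keys(p1,p2):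
--     '''
--
--     :param p1: first prime to generate public key
--     :param p2: second prime to generate public key
--     :return: return a list of possible public keys.
--     '''
--     tot = totient(p1,p2)
--     keys = []
--     for i in range (2,tot):
--         key = euclidian_mdc(tot,i)
--
--         if key == 1:
--             key = {"k1":p1*p2,"k2":i,'k3':tot}
--             keys.append(key)
--
--     return keys
-- ===== SOURCE B (Python) =====
-- def get_public_keys(p1, p2):
--     '''
--     :param p1: first prime to generate public key
--     :param p2: second prime to generate public key
--     :return: return a list of possible public keys.
--     '''
--     tot = (p1 - 1) * (p2 - 1)
--     if tot <= 2:
--         return []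
--     # sieve: mark every i in [0, tot) that shares a divisor >= 2 with tot
--     shares = bytearray(tot)
--     for d in range(2, tot):
--         if tot % d == 0:
--             shares[d::d] = b'\x01' * ((tot - 1) // d)
--     n = p1 * p2
--     return [{"k1": n, "k2": i, "k3": tot} for i in range(2, tot) if not shares[i]]
-- ===== Notes on version B (the rewrite author's own statement) =====
-- stated objective: faster
-- what changed: Replaces the per-candidate Euclidean-gcd loop over every i in range(2, tot) by a single divisor sieve: each divisor d of tot marks its multiples once (via slice assignment), and the unmarked i are collected; no gcd is ever computed.
import Mathlib
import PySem

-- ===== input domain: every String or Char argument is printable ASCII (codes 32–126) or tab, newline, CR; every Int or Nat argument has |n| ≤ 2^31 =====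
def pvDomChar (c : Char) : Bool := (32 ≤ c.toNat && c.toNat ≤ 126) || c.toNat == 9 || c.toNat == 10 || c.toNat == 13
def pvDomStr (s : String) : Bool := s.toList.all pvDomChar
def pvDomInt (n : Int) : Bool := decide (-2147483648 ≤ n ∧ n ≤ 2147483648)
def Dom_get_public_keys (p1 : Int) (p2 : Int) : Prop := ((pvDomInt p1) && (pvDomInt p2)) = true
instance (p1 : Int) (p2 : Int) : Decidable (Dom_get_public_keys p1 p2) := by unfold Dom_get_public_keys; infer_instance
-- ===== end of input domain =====

-- B replaces the per-candidate gcd loop by a divisor sieve over [0, tot); proved equal for all inputs.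

-- ===== PORT A =====
def totient (p1 : Int) (p2 : Int) : Int := (p1 - 1) * (p2 - 1)

-- port of euclidian_mdc: the while-loop becomes recursion on the (strictly shrinking) |divider|
def euclidian_mdc (divider : Int) (dividend : Int) : Int :=
  if _h : divider = 0 then dividend
  else euclidian_mdc (PySem.Int.mod dividend divider) divider
termination_by divider.natAbs
decreasing_by
  rcases lt_trichotomy divider 0 with hb | hb | hb
  · have h1 := PySem.Int.mod_neg_bounds dividend hb
    omega
  · exact absurd hb _h
  · have h1 := PySem.Int.mod_nonneg dividend hb
    have h2 := PySem.Int.mod_lt dividend hb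
    omega

def get_public_keys (p1 : Int) (p2 : Int) : List (List (String × Int)) :=
  let tot := totient p1 p2
  (PySem.List.pyRange 2 tot 1).foldl
    (fun keys i =>
      let key := euclidian_mdc tot i
      if key = 1 then keys ++ [[("k1", p1 * p2), ("k2", i), ("k3", tot)]] else keys)
    []

-- ===== PORT B =====
def get_public_keys_alt (p1 : Int) (p2 : Int) : List (List (String × Int)) :=
  let tot := (p1 - 1) * (p2 - 1)
  if tot ≤ 2 then []
  else
    -- shares = bytearray(tot)
    let shares : List Bool := List.replicate tot.toNat false
    let shares := (PySem.List.pyRange 2 tot 1).foldl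
      (fun sh d =>
        if PySem.Int.mod tot d = 0 then
          -- exact port of the slice assignment shares[d::d] = b'\x01' * ((tot-1)//d):
          -- set the entries at indices d, 2d, 3d, … < tot (all in range, so List.set is exact)
          (PySem.List.pyRange d tot d).foldl (fun s m => s.set m.toNat true) sh
        else sh)
      shares
    let n := p1 * p2
    -- the comprehension; shares[i] with 2 ≤ i < tot = len(shares) is in range, so getD is exact
    ((PySem.List.pyRange 2 tot 1).filter (fun i => !(shares.getD i.toNat false))).map
      (fun i => [("k1", n), ("k2", i), ("k3", tot)])

-- ===== PRECONDITION & SPEC =====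
def Spec_get_public_keys (p1 : Int) (p2 : Int) (out : List (List (String × Int))) : Prop := out = get_public_keys_alt p1 p2
instance (p1 : Int) (p2 : Int) (out : List (List (String × Int))) : Decidable (Spec_get_public_keys p1 p2 out) := by unfold Spec_get_public_keys; infer_instance

-- ===== CLAIM (what is proved, stated in full; the proofs are below) =====
def Claim_equal_get_public_keys : Prop := ∀ (p1 : Int) (p2 : Int), Dom_get_public_keys p1 p2 → Spec_get_public_keys p1 p2 (get_public_keys p1 p2)

-- ===== LEMMAS AND PROOFS =====

-- the euclidian_mdc loop computes gcd on nonnegative inputs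
lemma euclid_eq_gcd : ∀ (n : Nat) (a b : Int), a.natAbs ≤ n → 0 ≤ a → 0 ≤ b →
    euclidian_mdc a b = (Nat.gcd a.natAbs b.natAbs : Int) := by
  intro n
  induction n with
  | zero =>
    intro a b hle ha hb
    have ha0 : a = 0 := by omega
    subst ha0
    rw [euclidian_mdc]
    simp [Int.natAbs_of_nonneg hb]
  | succ n ih =>
    intro a b hle ha hb
    by_cases h0 : a = 0
    · subst h0
      rw [euclidian_mdc]
      simp [Int.natAbs_of_nonneg hb]
    · have hapos : 0 < a := lt_of_le_of_ne ha (Ne.symm h0)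
      rw [euclidian_mdc]
      simp only [h0, dite_false]
      have hmod : PySem.Int.mod b a = b % a := PySem.Int.mod_eq_emod_of_pos hapos
      have hmn : 0 ≤ b % a := Int.emod_nonneg b (by omega)
      have hml : b % a < a := Int.emod_lt_of_pos b hapos
      rw [hmod]
      rw [ih (b % a) a (by omega) hmn ha]
      have : (b % a).natAbs = b.natAbs % a.natAbs := by
        obtain ⟨an, rfl⟩ := Int.eq_ofNat_of_zero_le ha
        obtain ⟨bn, rfl⟩ := Int.eq_ofNat_of_zero_le hb
        exact_mod_cast congrArg Int.natAbs (Int.natCast_emod bn an).symm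
      rw [this, ← Nat.gcd_rec]


-- setting a list of indices to true, read back through getD
lemma foldl_set_getD (ms : List Int) (sh : List Bool) (j : Nat) :
    (ms.foldl (fun s m => s.set m.toNat true) sh).getD j false =
      (sh.getD j false || (decide (j < sh.length) && ms.any (fun m => m.toNat == j))) := by
  induction ms generalizing sh with
  | nil => simp
  | cons m ms ih =>
    simp only [List.foldl_cons, List.any_cons, ih, List.length_set]
    simp only [List.getD_eq_getElem?_getD, List.getElem?_set]
    by_cases hm : m.toNat = j
    · by_cases hl : j < sh.length <;> simp [hm, hl]
    · have hb : (m.toNat == j) = false := by simp [hm]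
      simp [hb, hm]

lemma length_foldl_set (ms : List Int) (sh : List Bool) :
    (ms.foldl (fun s m => s.set m.toNat true) sh).length = sh.length := by
  induction ms generalizing sh with
  | nil => rfl
  | cons m ms ih => simp [ih]

-- membership of the stepped range, as a divisibility condition on the index
lemma any_pyRange_step (d tot : Int) (hd : 0 < d) (j : Nat) :
    (PySem.List.pyRange d tot d).any (fun m => m.toNat == j) =
      decide (d ≤ (j : Int) ∧ (j : Int) < tot ∧ d ∣ (j : Int)) := by
  rw [Bool.eq_iff_iff]
  simp only [List.any_eq_true, beq_iff_eq, decide_eq_true_eq]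
  constructor
  · rintro ⟨m, hm, hmj⟩
    rw [PySem.List.mem_pyRange_iff_of_pos hd] at hm
    obtain ⟨h1, h2, h3⟩ := hm
    have hmj' : m = (j : Int) := by omega
    subst hmj'
    refine ⟨h1, h2, ?_⟩
    simpa using dvd_add h3 (dvd_refl d)
  · rintro ⟨h1, h2, h3⟩
    refine ⟨(j : Int), ?_, by omega⟩
    rw [PySem.List.mem_pyRange_iff_of_pos hd]
    exact ⟨h1, h2, dvd_sub h3 dvd_rfl⟩

-- the whole sieve, read back through getD
lemma sieve_getD (tot : Int) (ds : List Int) (hds : ∀ d ∈ ds, 0 < d) (sh : List Bool) (j : Nat) :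
    (ds.foldl
        (fun sh d =>
          if PySem.Int.mod tot d = 0 then
            (PySem.List.pyRange d tot d).foldl (fun s m => s.set m.toNat true) sh
          else sh)
        sh).getD j false =
      (sh.getD j false ||
        (decide (j < sh.length) &&
          ds.any (fun d => decide (d ∣ tot) && decide (d ≤ (j : Int) ∧ (j : Int) < tot ∧ d ∣ (j : Int))))) := by
  induction ds generalizing sh with
  | nil => simp
  | cons d ds ih =>
    simp only [List.foldl_cons, List.any_cons]
    have hd : 0 < d := hds d (List.mem_cons_self ..)
    rw [ih (fun e he => hds e (List.mem_cons_of_mem _ he))]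
    by_cases hdvd : d ∣ tot
    · have : PySem.Int.mod tot d = 0 := (PySem.Int.mod_eq_zero_iff_dvd tot d).mpr hdvd
      rw [if_pos this, foldl_set_getD, length_foldl_set, any_pyRange_step d tot hd j]
      simp only [hdvd, decide_true, Bool.true_and]
      cases h1 : sh.getD j false <;> cases h2 : decide (j < sh.length) <;>
        cases h3 : decide (d ≤ (j : Int) ∧ (j : Int) < tot ∧ d ∣ (j : Int)) <;> simp
    · have : ¬ PySem.Int.mod tot d = 0 := fun h => hdvd ((PySem.Int.mod_eq_zero_iff_dvd tot d).mp h)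
      rw [if_neg this]
      simp [hdvd]

-- gcd = 1 on [2, tot) is exactly "no divisor 2 ≤ d < tot of tot divides i"
lemma gcd_one_iff_no_divisor (tot i : Int) (htot : 2 < tot) (hi1 : 2 ≤ i) (hi2 : i < tot) :
    (Nat.gcd tot.natAbs i.natAbs = 1) ↔
      ¬ ∃ d, 2 ≤ d ∧ d < tot ∧ d ∣ tot ∧ d ∣ i := by
  constructor
  · rintro hg ⟨d, hd2, hdt, hdvdt, hdvdi⟩
    have hdg : d.natAbs ∣ Nat.gcd tot.natAbs i.natAbs :=
      Nat.dvd_gcd (Int.natAbs_dvd_natAbs.mpr hdvdt) (Int.natAbs_dvd_natAbs.mpr hdvdi)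
    rw [hg, Nat.dvd_one] at hdg
    omega
  · intro hno
    by_contra hg
    set g := Nat.gcd tot.natAbs i.natAbs with hgdef
    have hgpos : 0 < g := Nat.gcd_pos_of_pos_left _ (by omega)
    have hg2 : 2 ≤ g := by omega
    have hgi : (g : Int) ∣ i := by
      have := Nat.gcd_dvd_right tot.natAbs i.natAbs
      rw [← hgdef] at this
      have h2 := Int.natCast_dvd_natCast.mpr this
      rwa [Int.natAbs_of_nonneg (by omega : (0:Int) ≤ i)] at h2
    have hgt : (g : Int) ∣ tot := by
      have := Nat.gcd_dvd_left tot.natAbs i.natAbs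
      rw [← hgdef] at this
      have h2 := Int.natCast_dvd_natCast.mpr this
      rwa [Int.natAbs_of_nonneg (by omega : (0:Int) ≤ tot)] at h2
    have hgle : (g : Int) ≤ i := Int.le_of_dvd (by omega) hgi
    exact hno ⟨(g : Int), by omega, by omega, hgt, hgi⟩


-- A's append loop is a filter+map
lemma A_fold (tot v : Int) (l : List Int) :
    l.foldl
        (fun keys i =>
          let key := euclidian_mdc tot i
          if key = 1 then keys ++ [[("k1", v), ("k2", i), ("k3", tot)]] else keys)
        [] =
      (l.filter (fun i => decide (euclidian_mdc tot i = 1))).map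
        (fun i => [("k1", v), ("k2", i), ("k3", tot)]) := by
  have := PySem.List.foldl_append_if (fun i => decide (euclidian_mdc tot i = 1))
    (fun i => [("k1", v), ("k2", i), ("k3", tot)]) l []
  simpa using this

-- the two membership tests agree on every candidate
lemma tests_agree (tot i : Int) (htot : 2 < tot) (hi1 : 2 ≤ i) (hi2 : i < tot) :
    decide (euclidian_mdc tot i = 1) =
      !(((PySem.List.pyRange 2 tot 1).foldl
          (fun sh d =>
            if PySem.Int.mod tot d = 0 then
              (PySem.List.pyRange d tot d).foldl (fun s m => s.set m.toNat true) sh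
            else sh)
          (List.replicate tot.toNat false)).getD i.toNat false) := by
  rw [sieve_getD tot _ (fun d hd => by rw [PySem.List.mem_pyRange_one] at hd; omega)]
  have h0 : (List.replicate tot.toNat false).getD i.toNat false = false := by
    simp [List.getD_eq_getElem?_getD, List.getElem?_replicate]
    split <;> rfl
  have hlen : decide (i.toNat < (List.replicate tot.toNat (false : Bool)).length) = true := by
    simp; omega
  rw [h0, hlen]
  have hcast : ((i.toNat : Int)) = i := Int.toNat_of_nonneg (by omega)
  rw [Bool.eq_iff_iff]
  simp only [Bool.false_or, Bool.true_and, Bool.not_eq_true', List.any_eq_false,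
    decide_eq_true_eq, Bool.and_eq_true, hcast,
    PySem.List.mem_pyRange_one]
  rw [euclid_eq_gcd tot.natAbs tot i le_rfl (by omega) (by omega)]
  have hgcd : ((Nat.gcd tot.natAbs i.natAbs : Int) = 1) ↔ Nat.gcd tot.natAbs i.natAbs = 1 := by
    omega
  rw [hgcd, gcd_one_iff_no_divisor tot i htot hi1 hi2]
  constructor
  · intro hno d hd hdvd
    exact hno ⟨d, hd.1, hd.2, hdvd.1, hdvd.2.2.2⟩
  · rintro hall ⟨d, hd2, hdt, hdvdt, hdvdi⟩
    have hdle : d ≤ i := Int.le_of_dvd (by omega) hdvdi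
    exact hall d ⟨hd2, hdt⟩ ⟨hdvdt, hdle, hi2, hdvdi⟩

-- ===== VERDICT (by name: the statement is the Claim_ definition above) =====
theorem get_public_keys_spec : Claim_equal_get_public_keys := by
  intro p1 p2 _dom
  unfold Spec_get_public_keys
  simp only [get_public_keys, get_public_keys_alt, totient]
  by_cases htot : (p1 - 1) * (p2 - 1) ≤ 2
  · rw [if_pos htot, PySem.List.pyRange_one_eq_nil htot]
    rfl
  · rw [if_neg htot, A_fold]
    rw [not_le] at htot
    apply congrArg
    apply List.filter_congr
    intro i hi
    rw [PySem.List.mem_pyRange_one] at hi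
    exact tests_agree _ i htot hi.1 hi.2
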